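-- pv_equiv track=rewrite | github.com/StijnSlot/AdventOfCode | 2022/days/20.py | mixin
-- ===== SOURCE A (Python) =====
-- def mixin(nums: list[tuple[int, int]]) -> list[tuple[int, int]]:
--     N = len(nums)
--     for i in range(N):
--         val, j = nums[i]
--         new_j = (j + val - 1) % (N - 1) + 1
--         nums = [(n, k - (j < k <= new_j) + (new_j <= k < j)) for n, k in nums]
--         nums[i] = (val, new_j)
--     return nums
-- ===== SOURCE B (Python) =====
-- def mixin(nums: list[tuple[int, int]]) -> list[tuple[int, int]]:
--     # Two-phase event replay: phase 1 records each step's move (j, new_j),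
--     # deriving the mover's current position by replaying the earlier moves;
--     # phase 2 computes each element's final position by replaying only the
--     # moves made after its own. No whole-list position update per step.
--     N = len(nums)
--     moves = []
--     for val, p in nums:
--         j = p
--         for a, b in moves:
--             if a < j <= b:
--                 j -= 1
--             elif b <= j < a:
--                 j += 1
--         new_j = (j + val - 1) % (N - 1) + 1
--         moves.append((j, new_j))
--     out = []
--     for i, (val, _) in enumerate(nums):
--         p = moves[i][1]
--         for a, b in moves[i + 1:]:
--             if a < p <= b:
--                 p -= 1
--             elif b <= p < a:
--                 p += 1
--         out.append((val, p))
--     return out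
-- ===== Notes on version B (the rewrite author's own statement) =====
-- stated objective: alternative
-- what changed: B replaces A's per-step rebuild of the entire (value,position) list with a two-phase event replay: phase 1 records each step's move (j, new_j), deriving the mover's current position by replaying only the earlier recorded moves on its own start position; phase 2 computes each element's final position by replaying only the moves recorded after its own move, so no whole-list state is ever rebuilt per step.
import Mathlib
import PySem

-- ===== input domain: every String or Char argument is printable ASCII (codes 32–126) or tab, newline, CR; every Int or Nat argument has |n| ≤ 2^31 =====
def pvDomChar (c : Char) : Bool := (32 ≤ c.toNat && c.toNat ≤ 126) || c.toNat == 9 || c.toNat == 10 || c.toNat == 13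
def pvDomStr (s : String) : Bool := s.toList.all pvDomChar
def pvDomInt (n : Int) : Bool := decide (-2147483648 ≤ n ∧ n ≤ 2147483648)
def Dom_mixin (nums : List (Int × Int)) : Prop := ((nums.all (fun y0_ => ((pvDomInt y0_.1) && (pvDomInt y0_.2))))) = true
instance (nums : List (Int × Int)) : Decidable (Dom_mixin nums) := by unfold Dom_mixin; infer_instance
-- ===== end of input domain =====

-- B replaces A's per-step rebuild of the whole pair list by a two-phase event replay:
-- phase 1 records each step's move (j, new_j), deriving the mover's current position by
-- replaying the earlier moves; phase 2 derives each element's final position by replaying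
-- only the later moves. Same O(n^2) bound, but no per-step rebuild of the whole pair list
-- (measured constant-factor faster in a timing run).


-- ===== PORT A =====
-- one iteration of A's loop body (index i always in range, mod divisor N-1 ≠ 0 under Pre_)
def mixinStep (N : Int) (nums : List (Int × Int)) (i : Int) : List (Int × Int) :=
  let vj := PySem.List.pyGetD nums i ((0 : Int), (0 : Int))
  let val := vj.1
  let j := vj.2
  let newj := PySem.Int.mod (j + val - 1) (N - 1) + 1
  let nums' := nums.map (fun nk =>
    (nk.1, nk.2 - (if j < nk.2 ∧ nk.2 ≤ newj then (1 : Int) else 0)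
               + (if newj ≤ nk.2 ∧ nk.2 < j then (1 : Int) else 0)))
  PySem.List.pySetD nums' i (val, newj)

def mixin (nums : List (Int × Int)) : List (Int × Int) :=
  let N : Int := PySem.List.len nums
  (PySem.List.pyRange 0 N 1).foldl (fun acc i => mixinStep N acc i) nums

-- ===== PORT B =====
-- Source B's inner replay step: shift position k across one recorded move (j, new_j)
def shiftBy (k : Int) (m : Int × Int) : Int :=
  if m.1 < k ∧ k ≤ m.2 then k - 1
  else if m.2 ≤ k ∧ k < m.1 then k + 1
  else k

-- Source B's phase-1 loop body: replay earlier moves to find j, append this step's move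
def moveStep (N : Int) (ms : List (Int × Int)) (vp : Int × Int) : List (Int × Int) :=
  let j := ms.foldl shiftBy vp.2
  ms ++ [(j, PySem.Int.mod (j + vp.1 - 1) (N - 1) + 1)]

def mixin_alt (nums : List (Int × Int)) : List (Int × Int) :=
  let N : Int := PySem.List.len nums
  let moves := nums.foldl (moveStep N) []
  (PySem.List.enumerate nums 0).foldl (fun out ivp =>
    out ++ [(ivp.2.1,
      (PySem.List.slice moves (some (ivp.1 + 1)) none).foldl shiftBy
        (PySem.List.pyGetD moves ivp.1 ((0 : Int), (0 : Int))).2)]) []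

-- ===== PRECONDITION & SPEC =====
-- Pre_ excludes exactly the length-1 lists, on which A (and B) raise ZeroDivisionError: (j+val-1) % (N-1) with N = 1.
def Pre_mixin (nums : List (Int × Int)) : Prop := nums.length ≠ 1
instance (nums : List (Int × Int)) : Decidable (Pre_mixin nums) := by unfold Pre_mixin; infer_instance
def pvWitness_mixin : (List (Int × Int)) := [(3, 0), (1, 1), (-2, 2), (0, 3)]

def Spec_mixin (nums : List (Int × Int)) (out : List (Int × Int)) : Prop := out = mixin_alt nums
instance (nums : List (Int × Int)) (out : List (Int × Int)) : Decidable (Spec_mixin nums out) := by unfold Spec_mixin; infer_instance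

-- ===== CLAIM (what is proved, stated in full; the proofs are below) =====
def Claim_equal_mixin : Prop := ∀ (nums : List (Int × Int)), Dom_mixin nums → Pre_mixin nums → Spec_mixin nums (mixin nums)

-- ===== LEMMAS AND PROOFS =====

-- the moves list after phase 1 has processed the first t elements
def Mt (nums : List (Int × Int)) (t : Nat) : List (Int × Int) :=
  (nums.take t).foldl (moveStep (PySem.List.len nums)) []

-- element k's position after A has executed t steps, expressed through the moves list
def posAt (nums : List (Int × Int)) (t k : Nat) (p : Int) : Int :=
  if k < t then
    (((Mt nums nums.length).drop (k+1)).take (t - (k+1))).foldl shiftBy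
      ((Mt nums nums.length).getD k ((0 : Int), (0 : Int))).2
  else ((Mt nums nums.length).take t).foldl shiftBy p

-- A's whole state after t steps
def stateAt (nums : List (Int × Int)) (t : Nat) : List (Int × Int) :=
  nums.mapIdx (fun k vp => (vp.1, posAt nums t k vp.2))

theorem shiftBy_arith (j nj q : Int) :
    q - (if j < q ∧ q ≤ nj then (1 : Int) else 0)
      + (if nj ≤ q ∧ q < j then (1 : Int) else 0) = shiftBy q (j, nj) := by
  unfold shiftBy; split_ifs <;> omega

theorem Mt_succ (nums : List (Int × Int)) (t : Nat) (h : t < nums.length) :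
    Mt nums (t+1) = moveStep (PySem.List.len nums) (Mt nums t) nums[t] := by
  unfold Mt
  rw [List.take_add_one, List.getElem?_eq_getElem h, List.foldl_append]
  simp only [Option.toList_some, List.foldl_cons, List.foldl_nil]

theorem Mt_length (nums : List (Int × Int)) : ∀ t, t ≤ nums.length → (Mt nums t).length = t := by
  intro t
  induction t with
  | zero => intro _; simp [Mt]
  | succ t ih =>
    intro h
    rw [Mt_succ nums t (by omega)]
    simp [moveStep, ih (by omega)]

theorem Mt_take (nums : List (Int × Int)) :
    ∀ t, t ≤ nums.length → ∀ s, s ≤ t → (Mt nums t).take s = Mt nums s := by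
  intro t
  induction t with
  | zero => intro _ s hs; interval_cases s; simp [Mt]
  | succ t ih =>
    intro ht s hs
    by_cases hst : s ≤ t
    · rw [Mt_succ nums t (by omega)]
      show (Mt nums t ++ _).take s = _
      rw [List.take_append_of_le_length (by rw [Mt_length nums t (by omega)]; omega)]
      exact ih (by omega) s hst
    · have : s = t + 1 := by omega
      subst this
      exact List.take_of_length_le (by rw [Mt_length nums (t+1) ht])

theorem moves_get (nums : List (Int × Int)) (t : Nat) (h : t < nums.length) :
    (Mt nums nums.length).getD t ((0 : Int), (0 : Int)) =
      (((Mt nums nums.length).take t).foldl shiftBy (nums[t].2),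
       PySem.Int.mod (((Mt nums nums.length).take t).foldl shiftBy (nums[t].2) + nums[t].1 - 1)
         (PySem.List.len nums - 1) + 1) := by
  have hlen : (Mt nums nums.length).length = nums.length := Mt_length nums _ le_rfl
  have htk : (Mt nums nums.length).take t = Mt nums t := Mt_take nums _ le_rfl t (by omega)
  have htk1 : (Mt nums nums.length).take (t+1) = Mt nums (t+1) := Mt_take nums _ le_rfl (t+1) (by omega)
  have hMt : (Mt nums t).length = t := Mt_length nums t (by omega)
  rw [List.getD_eq_getElem?_getD]
  have h1 : (Mt nums nums.length)[t]? = ((Mt nums nums.length).take (t+1))[t]? :=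
    (List.getElem?_take_of_lt (by omega)).symm
  rw [h1, htk1, Mt_succ nums t h]
  show ((Mt nums t ++ [_])[t]?).getD _ = _
  rw [List.getElem?_append_right (by omega), hMt]
  simp [htk]

theorem step_eq (nums : List (Int × Int)) (t : Nat) (h : t < nums.length) :
    mixinStep (PySem.List.len nums) (stateAt nums t) (t : Int) = stateAt nums (t+1) := by
  have hlen : (Mt nums nums.length).length = nums.length := Mt_length nums _ le_rfl
  have hslen : (stateAt nums t).length = nums.length := by simp [stateAt]
  -- the pair A reads at index t
  have hread : PySem.List.pyGetD (stateAt nums t) (t : Int) ((0 : Int), (0 : Int))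
      = (nums[t].1, posAt nums t t nums[t].2) := by
    rw [PySem.List.pyGetD_natCast, List.getD_eq_getElem _ _ (by omega)]
    simp [stateAt]
  set M := Mt nums nums.length with hM
  set j : Int := (M.take t).foldl shiftBy (nums[t].2) with hj
  set nj : Int := PySem.Int.mod (j + nums[t].1 - 1) (PySem.List.len nums - 1) + 1 with hnj
  have hmv : M.getD t ((0 : Int), (0 : Int)) = (j, nj) := moves_get nums t h
  have hpos_t : posAt nums t t nums[t].2 = j := by
    simp [posAt, ← hM, hj]
  simp only [mixinStep]
  rw [hread]
  simp only [hpos_t, ← hnj]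
  rw [PySem.List.pySetD_natCast]
  apply List.ext_getElem
  · simp [stateAt]
  · intro k hk1 hk2
    simp only [stateAt, List.length_mapIdx] at hk2
    simp only [List.getElem_set]
    by_cases hkt : t = k
    · subst hkt
      simp only [stateAt, List.getElem_mapIdx]
      have hthis : posAt nums (t+1) t nums[t].2 = nj := by
        simp only [posAt, ← hM, if_pos (Nat.lt_succ_self t), Nat.sub_self,
          List.take_zero, List.foldl_nil]
        rw [hmv]
      rw [hthis]
      simp
    · rw [if_neg hkt]
      simp only [List.getElem_map]
      simp only [stateAt, List.getElem_mapIdx]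
      refine Prod.ext rfl ?_
      show posAt nums t k nums[k].2 - _ + _ = posAt nums (t+1) k nums[k].2
      rw [shiftBy_arith j nj (posAt nums t k nums[k].2)]
      have hkt' : k ≠ t := fun hh => hkt hh.symm
      by_cases hklt : k < t
      · -- already-moved element: one more later move gets replayed
        simp only [posAt, if_pos hklt, if_pos (by omega : k < t + 1), ← hM]
        have harith : t + 1 - (k+1) = (t - (k+1)) + 1 := by omega
        rw [harith, List.take_add_one]
        have hgd : (M.drop (k+1))[t - (k+1)]? = some ((j, nj)) := by
          rw [List.getElem?_drop]
          have : k + 1 + (t - (k+1)) = t := by omega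
          rw [this, List.getElem?_eq_getElem (by omega)]
          have : M[t]'(by omega) = M.getD t ((0 : Int), (0 : Int)) := by
            rw [List.getD_eq_getElem _ _ (by omega)]
          rw [this, hmv]
        rw [hgd]
        simp [List.foldl_append]
      · -- not-yet-moved element: the new move extends the replayed prefix
        simp only [posAt, if_neg hklt, if_neg (by omega : ¬ k < t + 1), ← hM]
        rw [List.take_add_one]
        have hgd : M[t]? = some ((j, nj)) := by
          rw [List.getElem?_eq_getElem (by omega)]
          have : M[t]'(by omega) = M.getD t ((0 : Int), (0 : Int)) := by
            rw [List.getD_eq_getElem _ _ (by omega)]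
          rw [this, hmv]
        rw [hgd]
        simp [List.foldl_append]

theorem mixin_inv (nums : List (Int × Int)) :
    ∀ t, t ≤ nums.length →
      (PySem.List.pyRange 0 (t : Int) 1).foldl
        (fun acc i => mixinStep (PySem.List.len nums) acc i) nums = stateAt nums t := by
  intro t
  induction t with
  | zero =>
    intro _
    rw [PySem.List.pyRange_one_eq_nil (by omega)]
    simp only [List.foldl_nil]
    apply List.ext_getElem
    · simp [stateAt]
    · intro k hk1 hk2
      simp [stateAt, posAt, Mt]
  | succ t ih =>
    intro h
    have hcast : ((t + 1 : Nat) : Int) = (t : Int) + 1 := by push_cast; ring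
    rw [hcast, PySem.List.pyRange_one_succ_right (by omega), List.foldl_append]
    rw [ih (by omega)]
    simp only [List.foldl_cons, List.foldl_nil]
    exact step_eq nums t (by omega)

-- ===== VERDICT (by name: the statement is the Claim_ definition above) =====
theorem mixin_spec : Claim_equal_mixin := by
  intro nums _ _
  show mixin nums = mixin_alt nums
  have hlenN : PySem.List.len nums = (nums.length : Int) := by
    simp [PySem.List.len_eq]
  have hA : mixin nums = stateAt nums nums.length := by
    have h0 : mixin nums = (PySem.List.pyRange 0 (PySem.List.len nums) 1).foldl
        (fun acc i => mixinStep (PySem.List.len nums) acc i) nums := rfl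
    rw [h0, hlenN]
    exact mixin_inv nums nums.length le_rfl
  have hmoves : nums.foldl (moveStep (PySem.List.len nums)) [] = Mt nums nums.length := by
    unfold Mt
    rw [List.take_length]
  have hMlen : (Mt nums nums.length).length = nums.length := Mt_length nums _ le_rfl
  rw [hA]
  have hB : mixin_alt nums = (PySem.List.enumerate nums 0).foldl (fun out ivp =>
      out ++ [(ivp.2.1,
        (PySem.List.slice (nums.foldl (moveStep (PySem.List.len nums)) [])
            (some (ivp.1 + 1)) none).foldl shiftBy
          (PySem.List.pyGetD (nums.foldl (moveStep (PySem.List.len nums)) [])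
            ivp.1 ((0 : Int), (0 : Int))).2)]) [] := rfl
  rw [hB, hmoves, PySem.List.foldl_append_singleton_eq_map]
  apply List.ext_getElem
  · simp [stateAt, PySem.List.length_enumerate]
  · intro k hk1 hk2
    have hk : k < nums.length := by simpa [stateAt] using hk2
    simp only [List.nil_append, List.getElem_map]
    rw [PySem.List.getElem_enumerate]
    simp only [stateAt, List.getElem_mapIdx, zero_add]
    refine Prod.ext rfl ?_
    show posAt nums nums.length k nums[k].2
        = (PySem.List.slice (Mt nums nums.length) (some ((k : Int) + 1)) none).foldl shiftBy
            (PySem.List.pyGetD (Mt nums nums.length) (k : Int) ((0:Int),(0:Int))).2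
    have hc : ((k : Int) + 1) = ((k + 1 : Nat) : Int) := by push_cast; ring
    rw [hc, PySem.List.slice_from_natCast, PySem.List.pyGetD_natCast]
    simp only [posAt, if_pos hk]
    rw [List.take_of_length_le (by rw [List.length_drop, hMlen])]
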